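-- pv_equiv track=rewrite | github.com/JustusBraitinger/Autodesk-Fusion-360-MCP-Server | FusionMCPBridge/cam.py | _generate_warning_recommendations
-- ===== SOURCE A (Python) =====
-- def _generate_warning_recommendations(warnings: list, tool_data: dict) -> list:
--     """
--     Generate recommendations for addressing warnings.
--
--     Args:
--         warnings: List of warning descriptions
--         tool_data: Tool information
--
--     Returns:
--         list: List of recommendations for warnings
--     """
--     recommendations = []
--
--     try:
--         for warning in warnings:
--             if "high feedrate" in warning.lower() and "finishing" in warning.lower():
--                 recommendations.append("Reduce feedrate for finishing passes to improve surface quality")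
--
--             elif "low feedrate" in warning.lower() and "roughing" in warning.lower():
--                 recommendations.append("Increase feedrate for roughing passes to improve efficiency")
--
--             elif "high surface speed" in warning.lower():
--                 recommendations.append("Reduce spindle speed or verify tool specifications")
--
--             elif "stock to leave" in warning.lower() and "finishing" in warning.lower():
--                 recommendations.append("Remove stock to leave from finishing passes")
--
--     except Exception:
--         pass
--
--     return recommendations
-- ===== SOURCE B (Python) =====
-- # Feature-extraction + precomputed decision table: each warning is reduced to a
-- # 6-bit keyword-presence mask; a 64-entry table (built once at import time)
-- # maps each mask directly to its recommendation (or None).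
-- _KEYS = ["high feedrate", "finishing", "low feedrate", "roughing",
--          "high surface speed", "stock to leave"]
--
--
-- def _decide(mask):
--     hf, fin, lf, ro, hss, stl = (bool(mask & (1 << i)) for i in range(6))
--     if hf and fin:
--         return "Reduce feedrate for finishing passes to improve surface quality"
--     if lf and ro:
--         return "Increase feedrate for roughing passes to improve efficiency"
--     if hss:
--         return "Reduce spindle speed or verify tool specifications"
--     if stl and fin:
--         return "Remove stock to leave from finishing passes"
--     return None
--
--
-- _TABLE = [_decide(m) for m in range(64)]
--
--
-- def _generate_warning_recommendations(warnings: list, tool_data: dict) -> list: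
--     recommendations = []
--     try:
--         for warning in warnings:
--             w = warning.lower()
--             mask = 0
--             for i, key in enumerate(_KEYS):
--                 if key in w:
--                     mask |= 1 << i
--             r = _TABLE[mask]
--             if r is not None:
--                 recommendations.append(r)
--     except Exception:
--         pass
--     return recommendations
-- ===== Notes on version B (the rewrite author's own statement) =====
-- stated objective: alternative
-- what changed: Replaces the if/elif substring chain by feature extraction: each warning is folded to a 6-bit keyword-presence bitmask which indexes a 64-entry decision table precomputed once at import time.
import Mathlib
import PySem

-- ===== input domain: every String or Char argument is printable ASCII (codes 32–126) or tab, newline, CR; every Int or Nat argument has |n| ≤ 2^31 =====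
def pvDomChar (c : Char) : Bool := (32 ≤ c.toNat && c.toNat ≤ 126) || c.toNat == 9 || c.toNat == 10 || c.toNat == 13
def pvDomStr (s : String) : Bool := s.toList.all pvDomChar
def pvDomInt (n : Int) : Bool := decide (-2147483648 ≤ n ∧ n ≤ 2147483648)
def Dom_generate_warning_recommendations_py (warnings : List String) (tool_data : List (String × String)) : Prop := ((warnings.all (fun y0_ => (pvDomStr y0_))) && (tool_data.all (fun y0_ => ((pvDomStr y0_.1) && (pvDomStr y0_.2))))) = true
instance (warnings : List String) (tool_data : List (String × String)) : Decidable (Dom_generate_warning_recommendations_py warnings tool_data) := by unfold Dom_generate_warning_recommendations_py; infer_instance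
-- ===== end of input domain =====

-- B replaces A's if/elif substring chain by feature extraction: each warning is folded to a
-- 6-bit keyword-presence bitmask indexing a 64-entry decision table built once up front;
-- same return value, no speed claim.

-- ===== PORT A =====
-- Literal transliteration of A: a fold over warnings; each step re-tests warning.lower()
-- in the same if/elif order, appending the matching recommendation (if any).
def generate_warning_recommendations_py (warnings : List String) (_tool_data : List (String × String)) : List String :=
  warnings.foldl (fun recommendations warning =>
    if PySem.Str.isIn "high feedrate" (PySem.Str.lower warning) &&
       PySem.Str.isIn "finishing" (PySem.Str.lower warning) then
      recommendations ++ ["Reduce feedrate for finishing passes to improve surface quality"]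
    else if PySem.Str.isIn "low feedrate" (PySem.Str.lower warning) &&
            PySem.Str.isIn "roughing" (PySem.Str.lower warning) then
      recommendations ++ ["Increase feedrate for roughing passes to improve efficiency"]
    else if PySem.Str.isIn "high surface speed" (PySem.Str.lower warning) then
      recommendations ++ ["Reduce spindle speed or verify tool specifications"]
    else if PySem.Str.isIn "stock to leave" (PySem.Str.lower warning) &&
            PySem.Str.isIn "finishing" (PySem.Str.lower warning) then
      recommendations ++ ["Remove stock to leave from finishing passes"]
    else recommendations) []

-- ===== PORT B =====
-- the six keyword features, in bit order
def pvKeys : List String :=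
  ["high feedrate", "finishing", "low feedrate", "roughing", "high surface speed", "stock to leave"]

-- Source B's _decide: decision from a feature bitmask
def pvDecide (mask : Nat) : Option String :=
  let hf := mask.testBit 0
  let fin := mask.testBit 1
  let lf := mask.testBit 2
  let ro := mask.testBit 3
  let hss := mask.testBit 4
  let stl := mask.testBit 5
  if hf && fin then some "Reduce feedrate for finishing passes to improve surface quality"
  else if lf && ro then some "Increase feedrate for roughing passes to improve efficiency"
  else if hss then some "Reduce spindle speed or verify tool specifications"
  else if stl && fin then some "Remove stock to leave from finishing passes"
  else none

-- Source B's _TABLE, precomputed over all 64 masks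
def pvTable : List (Option String) := (List.range 64).map pvDecide

-- the inner mask-accumulating loop of Source B
def pvMaskOf (w : String) : Nat :=
  (PySem.List.enumerate pvKeys).foldl
    (fun mask p => if PySem.Str.isIn p.2 w then mask ||| (1 <<< p.1.toNat) else mask) 0

def generate_warning_recommendations_py_alt (warnings : List String) (_tool_data : List (String × String)) : List String :=
  warnings.foldl (fun recommendations warning =>
    match pvTable.getD (pvMaskOf (PySem.Str.lower warning)) none with
    | some r => recommendations ++ [r]
    | none => recommendations) []

-- ===== PRECONDITION & SPEC =====
def Spec_generate_warning_recommendations_py (warnings : List String) (tool_data : List (String × String)) (out : List String) : Prop := out = generate_warning_recommendations_py_alt warnings tool_data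
instance (warnings : List String) (tool_data : List (String × String)) (out : List String) : Decidable (Spec_generate_warning_recommendations_py warnings tool_data out) := by unfold Spec_generate_warning_recommendations_py; infer_instance

-- ===== CLAIM (what is proved, stated in full; the proofs are below) =====
def Claim_equal_generate_warning_recommendations_py : Prop := ∀ (warnings : List String) (tool_data : List (String × String)), Dom_generate_warning_recommendations_py warnings tool_data → Spec_generate_warning_recommendations_py warnings tool_data (generate_warning_recommendations_py warnings tool_data)

-- ===== LEMMAS AND PROOFS =====
-- the per-warning step functions of the two folds agree
theorem pv_step_eq (recommendations : List String) (warning : String) :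
    (if PySem.Str.isIn "high feedrate" (PySem.Str.lower warning) &&
        PySem.Str.isIn "finishing" (PySem.Str.lower warning) then
       recommendations ++ ["Reduce feedrate for finishing passes to improve surface quality"]
     else if PySem.Str.isIn "low feedrate" (PySem.Str.lower warning) &&
             PySem.Str.isIn "roughing" (PySem.Str.lower warning) then
       recommendations ++ ["Increase feedrate for roughing passes to improve efficiency"]
     else if PySem.Str.isIn "high surface speed" (PySem.Str.lower warning) then
       recommendations ++ ["Reduce spindle speed or verify tool specifications"]
     else if PySem.Str.isIn "stock to leave" (PySem.Str.lower warning) &&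
             PySem.Str.isIn "finishing" (PySem.Str.lower warning) then
       recommendations ++ ["Remove stock to leave from finishing passes"]
     else recommendations)
    = (match pvTable.getD (pvMaskOf (PySem.Str.lower warning)) none with
       | some r => recommendations ++ [r]
       | none => recommendations) := by
  have hm : pvMaskOf (PySem.Str.lower warning)
      = (if PySem.Str.isIn "high feedrate" (PySem.Str.lower warning) then 1 else 0)
      + (if PySem.Str.isIn "finishing" (PySem.Str.lower warning) then 2 else 0)
      + (if PySem.Str.isIn "low feedrate" (PySem.Str.lower warning) then 4 else 0)
      + (if PySem.Str.isIn "roughing" (PySem.Str.lower warning) then 8 else 0)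
      + (if PySem.Str.isIn "high surface speed" (PySem.Str.lower warning) then 16 else 0)
      + (if PySem.Str.isIn "stock to leave" (PySem.Str.lower warning) then 32 else 0) := by
    simp only [pvMaskOf, pvKeys, PySem.List.enumerate_cons, PySem.List.enumerate_nil,
      List.foldl_cons, List.foldl_nil]
    split_ifs <;> rfl
  rw [hm]
  cases h0 : PySem.Str.isIn "high feedrate" (PySem.Str.lower warning) <;>
  cases h1 : PySem.Str.isIn "finishing" (PySem.Str.lower warning) <;>
  cases h2 : PySem.Str.isIn "low feedrate" (PySem.Str.lower warning) <;>
  cases h3 : PySem.Str.isIn "roughing" (PySem.Str.lower warning) <;>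
  cases h4 : PySem.Str.isIn "high surface speed" (PySem.Str.lower warning) <;>
  cases h5 : PySem.Str.isIn "stock to leave" (PySem.Str.lower warning) <;>
    simp [pvTable, pvDecide] <;> rfl

-- ===== VERDICT (by name: the statement is the Claim_ definition above) =====
theorem generate_warning_recommendations_py_spec : Claim_equal_generate_warning_recommendations_py := by
  intro warnings tool_data _
  show generate_warning_recommendations_py warnings tool_data
      = generate_warning_recommendations_py_alt warnings tool_data
  unfold generate_warning_recommendations_py generate_warning_recommendations_py_alt
  congr 1
  funext recommendations warning
  exact pv_step_eq recommendations warning
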